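-- pv_equiv track=rewrite | github.com/TienDat11/husc-admission-chat-enrollment | rag2025/src/services/reranker.py | _apply_lost_in_middle
-- ===== SOURCE A (Python) =====
-- from typing import Any, Dict, List
--
-- def _apply_lost_in_middle(
--     chunks: List[Dict[str, Any]]
-- ) -> List[Dict[str, Any]]:
--     """
--     Reorder score-sorted chunks to mitigate the lost-in-the-middle effect.
--
--     Chunks are placed alternately at the front and back of a result list
--     so that the highest-scoring chunks end up at boundary positions where
--     LLM attention is strongest.
--
--     Example (5 chunks ranked 1st-5th by score):
--       Input:   [1st, 2nd, 3rd, 4th, 5th]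
--       Output:  [1st, 3rd, 5th, 4th, 2nd]
--                 ^                    ^
--                front               back  <- LLM pays most attention here
--
--     Args:
--         chunks: Score-sorted chunks (descending). Any length.
--
--     Returns:
--         Reordered list with boundary positions occupied by top-scored chunks.
--         Returns the input unchanged if len <= 2.
--     """
--     n = len(chunks)
--     if n <= 2:
--         return chunks
--
--     result = [None] * n
--     head, tail = 0, n - 1
--
--     for i, chunk in enumerate(chunks):
--         if i % 2 == 0:
--             result[head] = chunk
--             head += 1
--         else:
--             result[tail] = chunk
--             tail -= 1
--
--     return result
-- ===== SOURCE B (Python) =====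
-- def _weave(chunks):
--     if len(chunks) <= 1:
--         return chunks[:]
--     first, second, rest = chunks[0], chunks[1], chunks[2:]
--     return [first] + _weave(rest) + [second]
--
--
-- def _apply_lost_in_middle(chunks):
--     n = len(chunks)
--     if n <= 2:
--         return chunks
--     return _weave(chunks)
-- ===== Notes on version B (the rewrite author's own statement) =====
-- stated objective: simpler
-- what changed: Replaces A's preallocated result array with head/tail write cursors and an index-parity loop by a direct recursive construction: peel the first two chunks and return [first] + weave(rest) + [second], with the n<=2 guard kept.
import Mathlib
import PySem

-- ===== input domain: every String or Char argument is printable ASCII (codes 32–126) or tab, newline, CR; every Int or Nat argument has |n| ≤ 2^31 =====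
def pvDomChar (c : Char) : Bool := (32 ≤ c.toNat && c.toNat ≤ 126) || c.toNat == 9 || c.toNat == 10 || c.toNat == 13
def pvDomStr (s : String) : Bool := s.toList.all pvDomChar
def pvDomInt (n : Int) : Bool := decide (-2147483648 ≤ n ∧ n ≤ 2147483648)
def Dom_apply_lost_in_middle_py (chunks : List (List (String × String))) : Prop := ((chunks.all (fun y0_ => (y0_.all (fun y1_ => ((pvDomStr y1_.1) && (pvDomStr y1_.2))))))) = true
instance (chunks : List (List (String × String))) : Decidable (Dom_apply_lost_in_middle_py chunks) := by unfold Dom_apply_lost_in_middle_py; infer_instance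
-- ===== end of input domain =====

-- B replaces A's preallocated array with head/tail write cursors by a recursive
-- "sandwich" construction ([first] + weave(rest) + [second]); objective: simpler.

-- ===== PORT A =====
-- the for-loop of A: state = (result, head, tail), i the enumerate index.
-- Python's placeholder list is [None]*n; every slot is overwritten before the
-- loop ends, so the placeholder value [] below is never part of the output.
def pvLostLoop {α : Type} (l : List α) (result : List α) (head tail i : Int) : List α :=
  match l with
  | [] => result
  | c :: rest =>
      if PySem.Int.mod i 2 == 0 then
        pvLostLoop rest (PySem.List.pySetD result head c) (head + 1) tail (i + 1)
      else
        pvLostLoop rest (PySem.List.pySetD result tail c) head (tail - 1) (i + 1)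

def apply_lost_in_middle_py (chunks : List (List (String × String))) : List (List (String × String)) :=
  let n : Int := chunks.length
  if n ≤ 2 then chunks
  else
    let result : List (List (String × String)) := List.replicate chunks.length []
    pvLostLoop chunks result 0 (n - 1) 0

-- ===== PORT B =====
-- port of Source B's _weave: [chunks[0]] + _weave(chunks[2:]) + [chunks[1]]
def pvWeave {α : Type} (l : List α) (dflt : α) : List α :=
  if _h : l.length ≤ 1 then PySem.List.slice l none none
  else
    [PySem.List.pyGetD l 0 dflt] ++ pvWeave (PySem.List.slice l (some 2) none) dflt
      ++ [PySem.List.pyGetD l 1 dflt]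
  termination_by l.length
  decreasing_by
    rw [PySem.List.slice_from (xs := l) (a := 2) (by norm_num)]
    simp only [List.length_drop]
    omega

def apply_lost_in_middle_py_alt (chunks : List (List (String × String))) : List (List (String × String)) :=
  let n : Int := chunks.length
  if n ≤ 2 then chunks
  else pvWeave chunks []

-- ===== PRECONDITION & SPEC =====
def Spec_apply_lost_in_middle_py (chunks : List (List (String × String))) (out : List (List (String × String))) : Prop := out = apply_lost_in_middle_py_alt chunks
instance (chunks : List (List (String × String))) (out : List (List (String × String))) : Decidable (Spec_apply_lost_in_middle_py chunks out) := by unfold Spec_apply_lost_in_middle_py; infer_instance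

-- ===== CLAIM (what is proved, stated in full; the proofs are below) =====
def Claim_equal_apply_lost_in_middle_py : Prop := ∀ (chunks : List (List (String × String))), Dom_apply_lost_in_middle_py chunks → Spec_apply_lost_in_middle_py chunks (apply_lost_in_middle_py chunks)

-- ===== LEMMAS AND PROOFS =====

theorem pvWeave_nil {α : Type} (d : α) : pvWeave ([] : List α) d = [] := by
  rw [pvWeave.eq_def]; simp [PySem.List.slice_none_none]

theorem pvWeave_singleton {α : Type} (a : α) (d : α) : pvWeave [a] d = [a] := by
  rw [pvWeave.eq_def]; simp [PySem.List.slice_none_none]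

theorem pvWeave_cons_cons {α : Type} (a b : α) (rest : List α) (d : α) :
    pvWeave (a :: b :: rest) d = a :: (pvWeave rest d ++ [b]) := by
  rw [pvWeave.eq_def]
  rw [dif_neg (by simp)]
  rw [PySem.List.slice_from (xs := a :: b :: rest) (a := 2) (by norm_num)]
  norm_num [PySem.List.pyGetD, PySem.List.pyIdx?, PySem.List.pyGet?]
  constructor
  · rw [if_pos (by positivity)]; simp
  · have : Int.toNat 2 = 2 := rfl
    rw [this]
    rfl

theorem pv_take_set_of_le {α : Type} (l : List α) (j n : Nat) (v : α) (h : n ≤ j) :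
    (l.set j v).take n = l.take n := by
  apply List.ext_getElem <;> simp
  intro i h1 h2
  rw [List.getElem_set_ne (by omega)]
  simp

theorem pv_drop_set_of_lt {α : Type} (l : List α) (j n : Nat) (v : α) (h : j < n) :
    (l.set j v).drop n = l.drop n := by
  apply List.ext_getElem <;> simp
  intro i h1 h2
  rw [List.getElem_set_ne (by omega)]

theorem pv_mod_even (k : Int) : PySem.Int.mod (2 * k) 2 = 0 := by
  unfold PySem.Int.mod; rw [Int.fmod_eq_emod]; simp

theorem pv_mod_odd (k : Int) : ¬ PySem.Int.mod (2 * k + 1) 2 = 0 := by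
  unfold PySem.Int.mod; rw [Int.fmod_eq_emod]; simp

-- the loop invariant: with slots h..t still free (t+1-h = l.length) and an even
-- enumerate index, the loop fills exactly those slots with the weave of l.
theorem pvLostLoop_eq {α : Type} (d : α) : (l : List α) → ∀ (r : List α) (h t k : Nat),
    t + 1 = h + l.length → h + l.length ≤ r.length →
    pvLostLoop l r (h : Int) (t : Int) (2 * (k : Int)) =
      r.take h ++ pvWeave l d ++ r.drop (t + 1)
  | [] => by
    intro r h t k ht hlen
    simp [pvLostLoop, pvWeave_nil]
    have he : t + 1 = h := by simp at ht; omega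
    rw [he, List.take_append_drop]
  | [a] => by
    intro r h t k ht hlen
    have hh : h = t := by simp at ht; omega
    have hlt : h < r.length := by simp at hlen; omega
    rw [pvLostLoop]
    simp only [pv_mod_even, beq_self_eq_true, if_pos]
    rw [pvLostLoop]
    simp only [PySem.List.pySetD_natCast, pvWeave_singleton]
    subst hh
    rw [List.set_eq_take_append_cons_drop, if_pos hlt]
    simp
  | a :: b :: rest => by
    intro r h t k ht hlen
    simp only [List.length_cons] at ht hlen
    have hth : h + 1 < t + 1 := by omega
    have hhr : h < r.length := by omega
    have htr : t < r.length := by omega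
    rw [pvLostLoop]
    simp only [pv_mod_even, beq_self_eq_true, if_pos]
    rw [pvLostLoop]
    have hodd : (PySem.Int.mod (2 * (k : Int) + 1) 2 == 0) = false := by
      rw [beq_eq_false_iff_ne]
      exact pv_mod_odd k
    rw [hodd, if_neg (by simp)]
    simp only [PySem.List.pySetD_natCast]
    have hcast1 : (h : Int) + 1 = ((h + 1 : Nat) : Int) := by push_cast; ring
    have hcast2 : (t : Int) - 1 = ((t - 1 : Nat) : Int) := by omega
    have hcast3 : 2 * (k : Int) + 1 + 1 = 2 * ((k + 1 : Nat) : Int) := by push_cast; ring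
    rw [hcast1, hcast2, hcast3]
    rw [pvLostLoop_eq d rest ((r.set h a).set t b) (h + 1) (t - 1) (k + 1)
      (by omega) (by simp; omega)]
    have e1 : ((r.set h a).set t b).take (h + 1) = r.take h ++ [a] := by
      rw [pv_take_set_of_le _ t (h + 1) b (by omega)]
      rw [List.take_add_one]
      congr 1
      · exact pv_take_set_of_le _ h h a (le_refl h)
      · simp [hhr]
    have e2 : ((r.set h a).set t b).drop (t - 1 + 1) = b :: r.drop (t + 1) := by
      have ht1 : t - 1 + 1 = t := by omega
      rw [ht1]
      rw [List.drop_eq_getElem_cons (by simp; omega)]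
      congr 1
      · simp
      · rw [pv_drop_set_of_lt _ t (t + 1) b (by omega),
          pv_drop_set_of_lt _ h (t + 1) a (by omega)]
    rw [e1, e2, pvWeave_cons_cons]
    simp

theorem apply_lost_in_middle_py_eq (chunks : List (List (String × String))) :
    apply_lost_in_middle_py chunks = apply_lost_in_middle_py_alt chunks := by
  unfold apply_lost_in_middle_py apply_lost_in_middle_py_alt
  by_cases hn : (chunks.length : Int) ≤ 2
  · simp [hn]
  · simp only [hn, if_false]
    have h3 : 3 ≤ chunks.length := by omega
    have heq := pvLostLoop_eq ([] : List (String × String)) chunks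
      (List.replicate chunks.length []) 0 (chunks.length - 1) 0 (by omega) (by simp)
    simp only [Nat.cast_zero, mul_zero,
      Nat.cast_sub (by omega : 1 ≤ chunks.length), Nat.cast_one] at heq
    rw [heq]
    have h1 : chunks.length - 1 + 1 = chunks.length := by omega
    simp [h1]

-- ===== VERDICT (by name: the statement is the Claim_ definition above) =====
theorem apply_lost_in_middle_py_spec : Claim_equal_apply_lost_in_middle_py := by
  intro chunks _hdom
  unfold Spec_apply_lost_in_middle_py
  exact apply_lost_in_middle_py_eq chunks
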